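-- pv_equiv track=rewrite | github.com/Nirob-0812/CP_Using_Python | Codeforces/A_Contest_Proposal.py | min_new_problems
-- ===== SOURCE A (Python) =====
-- def min_new_problems(a, b):
--     n = len(a)
--     new_problems = 0
--
--     for i in range(n):
--         if a[i] > b[i]:
--             a.append(b[i])
--             a.sort()
--             a.pop()
--             new_problems += 1
--
--     return new_problems
-- ===== SOURCE B (Python) =====
-- def min_new_problems(a, b):
--     n = len(a)
--     i0 = -1
--     for i in range(n):
--         if a[i] > b[i]:
--             i0 = i
--             break
--     if i0 == -1:
--         return 0
--     s = sorted(a + [b[i0]])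
--     s.pop()
--     cnt = 1
--     q = i0 + 1
--     for j in range(i0 + 1, n):
--         if s[q] > b[j]:
--             cnt += 1
--         else:
--             q += 1
--     return cnt
-- ===== Notes on version B (the rewrite author's own statement) =====
-- stated objective: faster
-- what changed: A re-sorts the whole list after every insertion (append/sort/pop per triggering index); B sorts once at the first triggering index and finishes with a single two-pointer pass over the sorted list, using the fact that each insertion shifts the remaining comparisons by exactly one position.
import Mathlib
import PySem

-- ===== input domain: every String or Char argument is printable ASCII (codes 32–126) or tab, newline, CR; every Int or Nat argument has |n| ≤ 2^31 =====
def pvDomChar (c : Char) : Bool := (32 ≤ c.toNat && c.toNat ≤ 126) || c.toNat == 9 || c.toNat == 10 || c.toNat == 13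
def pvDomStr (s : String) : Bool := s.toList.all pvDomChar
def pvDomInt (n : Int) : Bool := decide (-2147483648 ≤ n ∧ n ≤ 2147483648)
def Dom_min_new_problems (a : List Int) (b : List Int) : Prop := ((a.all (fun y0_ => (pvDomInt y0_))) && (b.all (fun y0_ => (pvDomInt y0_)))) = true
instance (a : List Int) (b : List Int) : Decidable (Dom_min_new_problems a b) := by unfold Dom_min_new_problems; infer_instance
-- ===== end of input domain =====

-- B replaces A's repeated append/sort/pop simulation by one sort plus a single two-pointer
-- pass after the first insertion (asymptotically faster). A sorts the caller's list in
-- place once it inserts; B does not mutate its arguments — equivalence here is about the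
-- RETURN value only.

-- ===== PORT A =====
-- a.pop() : remove and return the last element (raises on empty; never empty here)
def pvPopLastA (xs : List Int) : List Int :=
  match PySem.List.pop? xs (-1) with
  | some (_, rest) => rest
  | none => xs

def pvAStep (b : List Int) (st : List Int × Int) (i : Int) : List Int × Int :=
  if PySem.List.pyGetD st.1 i 0 > PySem.List.pyGetD b i 0 then
    (pvPopLastA (PySem.List.sorted (st.1 ++ [PySem.List.pyGetD b i 0]) (fun y => y) false),
     st.2 + 1)
  else st

def min_new_problems (a : List Int) (b : List Int) : Int :=
  ((PySem.List.pyRange 0 (a.length : Int) 1).foldl (pvAStep b) (a, 0)).2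

-- ===== PORT B =====
def pvPopLastB (xs : List Int) : List Int :=
  match PySem.List.pop? xs (-1) with
  | some (_, rest) => rest
  | none => xs

-- first index i with a[i] > b[i], or -1 (B's first loop with break)
def pvFindTrig (a b : List Int) : List Int → Int
  | [] => -1
  | i :: rest =>
      if PySem.List.pyGetD a i 0 > PySem.List.pyGetD b i 0 then i else pvFindTrig a b rest

def pvBStep (s b : List Int) (st : Int × Int) (j : Int) : Int × Int :=
  if PySem.List.pyGetD s st.2 0 > PySem.List.pyGetD b j 0 then (st.1 + 1, st.2)
  else (st.1, st.2 + 1)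

def min_new_problems_alt (a : List Int) (b : List Int) : Int :=
  let n : Int := a.length
  let i0 := pvFindTrig a b (PySem.List.pyRange 0 n 1)
  if i0 = -1 then 0
  else
    let s := pvPopLastB (PySem.List.sorted (a ++ [PySem.List.pyGetD b i0 0]) (fun y => y) false)
    ((PySem.List.pyRange (i0 + 1) n 1).foldl (pvBStep s b) (1, i0 + 1)).1

-- ===== PRECONDITION & SPEC =====
-- Pre_ excludes exactly the inputs where the Python A raises IndexError (b shorter than a);
-- B's Python raises there as well.
def Pre_min_new_problems (a : List Int) (b : List Int) : Prop := a.length ≤ b.length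
instance (a : List Int) (b : List Int) : Decidable (Pre_min_new_problems a b) := by
  unfold Pre_min_new_problems; infer_instance

def pvWitness_min_new_problems : List Int × List Int := ([2, 1, 4], [1, 3, 3])

def Spec_min_new_problems (a : List Int) (b : List Int) (out : Int) : Prop := out = min_new_problems_alt a b
instance (a : List Int) (b : List Int) (out : Int) : Decidable (Spec_min_new_problems a b out) := by unfold Spec_min_new_problems; infer_instance

-- ===== CLAIM (what is proved, stated in full; the proofs are below) =====
def Claim_equal_min_new_problems : Prop := ∀ (a : List Int) (b : List Int), Dom_min_new_problems a b → Pre_min_new_problems a b → Spec_min_new_problems a b (min_new_problems a b)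

-- ===== LEMMAS AND PROOFS =====

lemma pvPopLastA_eq_dropLast (xs : List Int) (h : xs ≠ []) : pvPopLastA xs = xs.dropLast := by
  conv_lhs => rw [pvPopLastA, ← List.dropLast_append_getLast h, PySem.List.pop?_last]

lemma pvPopLastB_eq_A (xs : List Int) : pvPopLastB xs = pvPopLastA xs := rfl

lemma sorted_append_singleton (cur : List Int) (x : Int)
    (hs : List.Pairwise (· ≤ ·) cur) :
    PySem.List.sorted (cur ++ [x]) (fun y => y) false
      = cur.takeWhile (fun y => decide (y ≤ x)) ++ x :: cur.dropWhile (fun y => decide (y ≤ x)) := by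
  have hcur : cur.takeWhile (fun y => decide (y ≤ x)) ++ cur.dropWhile (fun y => decide (y ≤ x)) = cur :=
    List.takeWhile_append_dropWhile
  apply PySem.List.sorted_id_eq_of_perm_of_pairwise
  · have p1 : (cur.takeWhile (fun y => decide (y ≤ x)) ++ x :: cur.dropWhile (fun y => decide (y ≤ x))).Perm
        (x :: (cur.takeWhile (fun y => decide (y ≤ x)) ++ cur.dropWhile (fun y => decide (y ≤ x)))) :=
      List.perm_middle
    rw [hcur] at p1
    exact p1.trans (List.perm_append_singleton x cur).symm
  · have hsplit : List.Pairwise (· ≤ ·)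
        (cur.takeWhile (fun y => decide (y ≤ x)) ++ cur.dropWhile (fun y => decide (y ≤ x))) := by
      rw [hcur]; exact hs
    rw [List.pairwise_append] at hsplit ⊢
    obtain ⟨h1, h2, h3⟩ := hsplit
    refine ⟨h1, ?_, ?_⟩
    · -- Pairwise (x :: dw)
      rw [List.pairwise_cons]
      refine ⟨?_, h2⟩
      intro b hb
      -- every element of dropWhile is > x
      have hdw : ∀ b ∈ cur.dropWhile (fun y => decide (y ≤ x)), x < b := by
        intro b hb
        rcases hdwc : cur.dropWhile (fun y => decide (y ≤ x)) with _ | ⟨hd, tl⟩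
        · rw [hdwc] at hb; simp at hb
        · have hne : cur.dropWhile (fun y => decide (y ≤ x)) ≠ [] := by rw [hdwc]; simp
          have hhead0 := List.head_dropWhile_not (fun y => decide (y ≤ x)) hne
          simp only [hdwc, List.head_cons, decide_eq_false_iff_not] at hhead0
          have hhead : ¬ (hd ≤ x) := hhead0
          rw [hdwc] at hb
          rcases List.mem_cons.mp hb with rfl | htl
          · omega
          · have : hd ≤ b := by
              have := h2
              rw [hdwc, List.pairwise_cons] at this
              exact this.1 b htl
            omega
      exact le_of_lt (hdw b hb)
    · intro a ha b hb
      have hax : a ≤ x := by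
        have := List.mem_takeWhile_imp ha
        simpa using this
      rcases List.mem_cons.mp hb with rfl | hb'
      · exact hax
      · exact h3 a ha b hb'

lemma pvPhase2 (b s : List Int) (n : Nat) :
    ∀ (fuel j q : Nat) (cur : List Int) (cnt : Int),
      n - j ≤ fuel → q ≤ j → cur.length = n →
      List.Pairwise (· ≤ ·) cur →
      (∀ k, j ≤ k → k < n → cur.getD k 0 = s.getD (q + (k - j)) 0) →
      ((PySem.List.pyRange (j : Int) (n : Int) 1).foldl (pvAStep b) (cur, cnt)).2
        = ((PySem.List.pyRange (j : Int) (n : Int) 1).foldl (pvBStep s b) (cnt, (q : Int))).1 := by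
  intro fuel
  induction fuel with
  | zero =>
    intro j q cur cnt hf hq hl hp hinv
    rw [PySem.List.pyRange_one_eq_nil (by exact_mod_cast Nat.le_of_sub_eq_zero (Nat.le_zero.mp hf))]
    simp
  | succ fuel ih =>
    intro j q cur cnt hf hq hl hp hinv
    by_cases hjn : j < n
    · rw [PySem.List.pyRange_one_cons (by exact_mod_cast hjn)]
      have hcast : ((j : Int) + 1) = ((j + 1 : Nat) : Int) := by push_cast; ring
      have hj0 : cur.getD j 0 = s.getD q 0 := by
        have := hinv j le_rfl hjn
        simpa using this
      simp only [List.foldl_cons, pvAStep, pvBStep, PySem.List.pyGetD_natCast]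
      rw [hj0]
      by_cases hc : b.getD j 0 < s.getD q 0
      · -- trigger
        rw [if_pos hc, if_pos hc]
        have hcurj : cur.getD j 0 = cur[j]'(by omega) := List.getD_eq_getElem cur 0 (by omega)
        set x : Int := b.getD j 0 with hxdef
        have hxlt : x < cur[j]'(by omega) := by rw [← hcurj, hj0]; exact hc
        have hcur : cur.takeWhile (fun y => decide (y ≤ x)) ++ cur.dropWhile (fun y => decide (y ≤ x)) = cur :=
          List.takeWhile_append_dropWhile
        set tw := cur.takeWhile (fun y => decide (y ≤ x)) with htw
        set dw := cur.dropWhile (fun y => decide (y ≤ x)) with hdwdef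
        have hsor := sorted_append_singleton cur x hp
        rw [← htw, ← hdwdef] at hsor
        have hne0 : PySem.List.sorted (cur ++ [x]) (fun y => y) false ≠ [] := by
          rw [hsor]; simp
        have hdwne : dw ≠ [] := by
          intro hdwnil
          have htweq : tw = cur := by rw [← hcur, hdwnil, List.append_nil]
          have hmem : cur[j]'(by omega) ∈ tw := by rw [htweq]; exact List.getElem_mem _
          have := List.mem_takeWhile_imp (show _ ∈ cur.takeWhile (fun y => decide (y ≤ x)) from hmem)
          simp at this
          omega
        have hdwlen : 1 ≤ dw.length := List.length_pos_iff.mpr hdwne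
        have hsum : tw.length + dw.length = n := by
          rw [← hl, ← hcur]; simp
        have htwlen : tw.length ≤ j := by
          by_contra hcon
          push_neg at hcon
          have hpre : tw <+: cur := htw ▸ List.takeWhile_prefix _
          have heq : tw[j]'(hcon) = cur[j]'(by omega) := hpre.getElem hcon
          have hmem : tw[j]'(hcon) ∈ tw := List.getElem_mem _
          have := List.mem_takeWhile_imp (show _ ∈ cur.takeWhile (fun y => decide (y ≤ x)) from hmem)
          rw [heq] at this
          simp at this
          omega
        have hshape : pvPopLastA (PySem.List.sorted (cur ++ [x]) (fun y => y) false)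
            = (tw ++ [x]) ++ dw.dropLast := by
          rw [pvPopLastA_eq_dropLast _ hne0, hsor,
            show tw ++ x :: dw = (tw ++ [x]) ++ dw by simp,
            List.dropLast_append_of_ne_nil hdwne]
        have hlen' : ((tw ++ [x]) ++ dw.dropLast).length = n := by
          simp [List.length_dropLast]
          omega
        have hsorted' : List.Pairwise (· ≤ ·) ((tw ++ [x]) ++ dw.dropLast) := by
          have hpw := PySem.List.sorted_pairwise (cur ++ [x]) (fun y => y) (κ := Int)
          rw [hsor] at hpw
          have hsub : List.Sublist ((tw ++ x :: dw).dropLast) (tw ++ x :: dw) :=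
            List.dropLast_sublist _
          rw [show tw ++ x :: dw = (tw ++ [x]) ++ dw by simp,
            List.dropLast_append_of_ne_nil hdwne] at hsub
          exact (hpw.sublist (by simpa using hsub))
        have hinv' : ∀ k, j + 1 ≤ k → k < n →
            ((tw ++ [x]) ++ dw.dropLast).getD k 0 = s.getD (q + (k - (j + 1))) 0 := by
          intro k hk1 hk2
          have hklt : k < ((tw ++ [x]) ++ dw.dropLast).length := by rw [hlen']; omega
          have htwx : (tw ++ [x]).length ≤ k := by simp; omega
          have hdl : k - (tw ++ [x]).length < dw.dropLast.length := by
            simp [List.length_dropLast]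
            omega
          have hdwk : k - 1 - tw.length < dw.length := by omega
          have e1 : ((tw ++ [x]) ++ dw.dropLast).getD k 0
              = dw.dropLast[k - (tw ++ [x]).length]'(hdl) := by
            rw [List.getD_eq_getElem _ _ hklt]
            exact List.getElem_append_right htwx
          have e2 : dw.dropLast[k - (tw ++ [x]).length]'(hdl)
              = dw[k - 1 - tw.length]'(hdwk) := by
            rw [List.getElem_dropLast]
            congr 1
            simp
            omega
          have hk1lt : k - 1 < cur.length := by omega
          have htwk : tw.length ≤ k - 1 := by omega
          have e3 : cur.getD (k - 1) 0 = dw[k - 1 - tw.length]'(hdwk) := by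
            rw [List.getD_eq_getElem _ _ hk1lt]
            have h4 : (tw ++ dw)[k - 1]'(by rw [← hcur] at hk1lt; exact hk1lt)
                = cur[k - 1]'(hk1lt) := List.getElem_of_eq hcur _
            rw [← h4]
            exact List.getElem_append_right htwk
          have h5 := hinv (k - 1) (by omega) (by omega)
          rw [e1, e2, ← e3, h5]
          congr 1
          omega
        have hmain := ih (j + 1) q ((tw ++ [x]) ++ dw.dropLast) (cnt + 1) (by omega) (by omega)
          hlen' hsorted' hinv'
        rw [hcast, hshape]
        exact hmain
      · -- no trigger
        rw [if_neg hc, if_neg hc]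
        have hinv' : ∀ k, j + 1 ≤ k → k < n →
            cur.getD k 0 = s.getD ((q + 1) + (k - (j + 1))) 0 := by
          intro k hk1 hk2
          rw [hinv k (by omega) hk2]
          congr 1
          omega
        have hmain := ih (j + 1) (q + 1) cur cnt (by omega) (by omega) hl hp hinv'
        rw [hcast, show ((q : Int) + 1) = ((q + 1 : Nat) : Int) by push_cast; ring]
        exact hmain
    · have hle : (n : Int) ≤ (j : Int) := by exact_mod_cast Nat.le_of_not_lt hjn
      rw [PySem.List.pyRange_one_eq_nil hle]
      simp

lemma pvSortedPopNe (a : List Int) (x : Int) :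
    PySem.List.sorted (a ++ [x]) (fun y => y) false ≠ [] := by
  have hlen : (PySem.List.sorted (a ++ [x]) (fun y => y) false).length = a.length + 1 := by
    rw [PySem.List.length_sorted]; simp
  intro hnil
  rw [hnil] at hlen
  simp at hlen

lemma pvMain (a b : List Int) :
    ∀ (fuel i : Nat), a.length - i ≤ fuel →
      ((PySem.List.pyRange (i : Int) (a.length : Int) 1).foldl (pvAStep b) (a, 0)).2
        = (if pvFindTrig a b (PySem.List.pyRange (i : Int) (a.length : Int) 1) = -1 then 0 else
            ((PySem.List.pyRange (pvFindTrig a b (PySem.List.pyRange (i : Int) (a.length : Int) 1) + 1)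
                (a.length : Int) 1).foldl
              (pvBStep (pvPopLastB (PySem.List.sorted
                (a ++ [PySem.List.pyGetD b (pvFindTrig a b (PySem.List.pyRange (i : Int) (a.length : Int) 1)) 0])
                (fun y => y) false)) b)
              (1, pvFindTrig a b (PySem.List.pyRange (i : Int) (a.length : Int) 1) + 1)).1) := by
  intro fuel
  induction fuel with
  | zero =>
    intro i hf
    have hle : (a.length : Int) ≤ (i : Int) := by
      exact_mod_cast Nat.le_of_sub_eq_zero (Nat.le_zero.mp hf)
    rw [PySem.List.pyRange_one_eq_nil hle]
    simp [pvFindTrig]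
  | succ fuel ih =>
    intro i hf
    by_cases hin : i < a.length
    · rw [PySem.List.pyRange_one_cons (by exact_mod_cast hin)]
      have hcast : ((i : Int) + 1) = ((i + 1 : Nat) : Int) := by push_cast; ring
      simp only [pvFindTrig, List.foldl_cons, pvAStep]
      by_cases hc : PySem.List.pyGetD b (i : Int) 0 < PySem.List.pyGetD a (i : Int) 0
      · rw [if_pos hc, if_pos hc, if_neg (show ¬ ((i : Int) = -1) by omega)]
        set x : Int := PySem.List.pyGetD b (i : Int) 0 with hxdef
        set srt := PySem.List.sorted (a ++ [x]) (fun y => y) false with hsrt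
        have hne : srt ≠ [] := pvSortedPopNe a x
        have hsl : (pvPopLastB srt).length = a.length := by
          rw [pvPopLastB_eq_A, pvPopLastA_eq_dropLast _ hne, List.length_dropLast, hsrt,
            PySem.List.length_sorted]
          simp
        have hpw : List.Pairwise (· ≤ ·) (pvPopLastB srt) := by
          rw [pvPopLastB_eq_A, pvPopLastA_eq_dropLast _ hne]
          exact (PySem.List.sorted_pairwise (a ++ [x]) (fun y => y) (κ := Int)).sublist
            (List.dropLast_sublist _)
        have hinv : ∀ k, i + 1 ≤ k → k < a.length →
            (pvPopLastB srt).getD k 0 = (pvPopLastB srt).getD ((i + 1) + (k - (i + 1))) 0 := by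
          intro k hk1 hk2
          congr 1
          omega
        have hmain := pvPhase2 b (pvPopLastB srt) a.length fuel (i + 1) (i + 1)
          (pvPopLastB srt) 1 (by omega) le_rfl hsl hpw hinv
        rw [hcast]
        rw [pvPopLastB_eq_A] at hmain ⊢
        exact hmain
      · rw [if_neg hc, if_neg hc]
        have := ih (i + 1) (by omega)
        rw [hcast]
        exact this
    · have hle : (a.length : Int) ≤ (i : Int) := by exact_mod_cast Nat.le_of_not_lt hin
      rw [PySem.List.pyRange_one_eq_nil hle]
      simp [pvFindTrig]

-- ===== VERDICT (by name: the statement is the Claim_ definition above) =====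
theorem min_new_problems_spec : Claim_equal_min_new_problems := by
  unfold Claim_equal_min_new_problems
  intro a b hdom hpre
  unfold Spec_min_new_problems min_new_problems min_new_problems_alt
  have hmain := pvMain a b a.length 0 (by omega)
  simpa using hmain
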